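-- pv_equiv track=rewrite | github.com/Sierraki/Solutions | 力扣&Leetcode/算法&algorithm/周赛/168双周赛/Q2.数位平方和的最大值.py | maxSumOfSquares
-- ===== SOURCE A (Python) =====
-- def maxSumOfSquares(num: int, sum: int) -> str:
--     # 在满足这么多位情况下可以写多少个9
--     sum1 = sum
--     ans = ""
--     res = [0] * num
--     if num * 9 > sum1:
--         ans = ""
--     for i in range(len(res)):
--         if sum1 >= 9:
--             res[i] = 9
--             sum1 -= 9
--         elif sum1 > 0:
--             res[i] = sum1
--             break
--     aa = 0
--     for i in res:
--         aa += i
--     if aa == sum: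
--         return "".join(map(str, res))
--     return ""
-- ===== SOURCE B (Python) =====
-- def maxSumOfSquares(num: int, sum: int) -> str:
--     # Closed form: q full nines, one partial digit r, zero padding to length num.
--     if sum < 0 or sum > num * 9:
--         return ""
--     q, r = divmod(sum, 9)
--     s = "9" * q + (str(r) if r else "")
--     return s + "0" * (num - len(s))
-- ===== Notes on version B (the rewrite author's own statement) =====
-- stated objective: simpler
-- what changed: Replaces the greedy digit-filling loop and the verification re-summation pass with a closed form: divmod(sum, 9) gives the count of leading nines and the partial digit, and string repetition builds the answer directly.
import Mathlib
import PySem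

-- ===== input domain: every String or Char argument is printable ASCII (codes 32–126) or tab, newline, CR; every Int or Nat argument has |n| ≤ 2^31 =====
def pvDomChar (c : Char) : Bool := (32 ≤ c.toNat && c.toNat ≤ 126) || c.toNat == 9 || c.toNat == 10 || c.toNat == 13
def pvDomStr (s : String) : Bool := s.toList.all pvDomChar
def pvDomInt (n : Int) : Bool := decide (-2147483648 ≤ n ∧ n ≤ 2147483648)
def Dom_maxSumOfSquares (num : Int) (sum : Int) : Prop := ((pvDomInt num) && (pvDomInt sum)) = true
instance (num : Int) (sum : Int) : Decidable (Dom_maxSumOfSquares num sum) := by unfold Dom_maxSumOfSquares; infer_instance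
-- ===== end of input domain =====

-- B replaces A's greedy digit-filling loop and verification re-summation by a divmod closed form (objective: simpler).

-- ===== PORT A =====
-- A's 'for i in range(len(res))' mutates res[i] and sum1 and may break; ported as structural
-- recursion over the suffix of res (a break returns the rest of the list untouched).
def pvAFill : List Int → Int → List Int
  | [], _ => []
  | x :: xs, s =>
    if 9 ≤ s then 9 :: pvAFill xs (s - 9)
    else if 0 < s then s :: xs
    else x :: pvAFill xs s

def maxSumOfSquares (num : Int) (sum : Int) : String :=
  -- sum1 = sum; ans = "" — ans and the 'if num * 9 > sum1: ans = ""' branch are dead (ans is never read)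
  let res0 : List Int := PySem.List.pyRepeat [0] num     -- res = [0] * num
  let res := pvAFill res0 sum                            -- the loop
  let aa := res.foldl (fun a i => a + i) 0               -- for i in res: aa += i
  if aa = sum then PySem.Str.join "" (res.map PySem.Int.toStr) else ""

-- ===== PORT B =====
def maxSumOfSquares_alt (num : Int) (sum : Int) : String :=
  if sum < 0 ∨ num * 9 < sum then ""
  else
    let q := PySem.Int.floordiv sum 9                    -- q, r = divmod(sum, 9)
    let r := PySem.Int.mod sum 9
    let s : List Char := PySem.List.pyRepeat ['9'] q ++ (if r ≠ 0 then PySem.Int.toChars r else [])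
    String.ofList (s ++ PySem.List.pyRepeat ['0'] (num - s.length))

-- ===== PRECONDITION & SPEC =====
def Spec_maxSumOfSquares (num : Int) (sum : Int) (out : String) : Prop := out = maxSumOfSquares_alt num sum
instance (num : Int) (sum : Int) (out : String) : Decidable (Spec_maxSumOfSquares num sum out) := by unfold Spec_maxSumOfSquares; infer_instance

-- ===== CLAIM (what is proved, stated in full; the proofs are below) =====
def Claim_equal_maxSumOfSquares : Prop := ∀ (num : Int) (sum : Int), Dom_maxSumOfSquares num sum → Spec_maxSumOfSquares num sum (maxSumOfSquares num sum)

-- ===== LEMMAS AND PROOFS =====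

lemma pvFill_nonpos (n : Nat) (s : Int) (hs : s ≤ 0) :
    pvAFill (List.replicate n 0) s = List.replicate n 0 := by
  induction n with
  | zero => rfl
  | succ m ih =>
    simp only [List.replicate_succ, pvAFill]
    rw [if_neg (by omega), if_neg (by omega), ih]

def pvDigitChar (d : Int) : Char := Char.ofNat (48 + d.toNat)

lemma pvToChars_digit (d : Int) (h0 : 0 ≤ d) (h9 : d ≤ 9) :
    PySem.Int.toChars d = [pvDigitChar d] := by
  interval_cases d <;> decide

-- the loop's result when sum fits: q nines, an optional partial digit r, zeros behind
lemma pvFill_ok (q : Nat) (r : Int) (hr0 : 0 ≤ r) (hr : r < 9) :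
    ∀ n : Nat, q + (if r = 0 then 0 else 1) ≤ n →
    pvAFill (List.replicate n 0) (9 * q + r) =
      List.replicate q 9 ++ (if r = 0 then [] else [r])
        ++ List.replicate (n - q - (if r = 0 then 0 else 1)) 0 := by
  induction q with
  | zero =>
    intro n hn
    by_cases h : r = 0
    · simp [h, pvFill_nonpos n 0 le_rfl]
    · obtain ⟨m, rfl⟩ : ∃ m, n = m + 1 := ⟨n - 1, by simp [h] at hn; omega⟩
      simp only [List.replicate_succ, pvAFill]
      rw [if_neg (by omega), if_pos (by omega)]
      simp [h]
  | succ p ih =>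
    intro n hn
    obtain ⟨m, rfl⟩ : ∃ m, n = m + 1 := ⟨n - 1, by split at hn <;> omega⟩
    simp only [List.replicate_succ, pvAFill]
    rw [if_pos (by omega)]
    have : 9 * ((p + 1 : Nat) : Int) + r - 9 = 9 * p + r := by push_cast; ring
    rw [this, ih m (by by_cases h : r = 0 <;> simp [h] at hn ⊢ <;> omega)]
    have e1 : m + 1 - (p + 1) - (if r = 0 then 0 else 1) = m - p - (if r = 0 then 0 else 1) := by
      split <;> omega
    simp only [List.cons_append, e1]

-- the loop's result when sum does not fit: all nines
lemma pvFill_overflow (n : Nat) : ∀ (q : Nat) (r : Int), 0 ≤ r → r < 9 →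
    n < q + (if r = 0 then 0 else 1) →
    pvAFill (List.replicate n 0) (9 * q + r) = List.replicate n 9 := by
  induction n with
  | zero => intro q r _ _ _; rfl
  | succ m ih =>
    intro q r hr0 hr hn
    obtain ⟨p, rfl⟩ : ∃ p, q = p + 1 := ⟨q - 1, by split at hn <;> omega⟩
    simp only [List.replicate_succ, pvAFill]
    rw [if_pos (by omega)]
    have : 9 * ((p + 1 : Nat) : Int) + r - 9 = 9 * p + r := by push_cast; ring
    rw [this, ih p r hr0 hr (by by_cases h : r = 0 <;> simp [h] at hn ⊢ <;> omega)]

lemma pvFoldl_sum (l : List Int) (a : Int) : l.foldl (fun a i => a + i) a = a + l.sum := by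
  induction l generalizing a with
  | nil => simp
  | cons x xs ih => simp [ih]; ring

lemma pvSum_replicate (n : Nat) (x : Int) : (List.replicate n x).sum = n * x := by
  simp [List.sum_replicate]

-- join("", map(str, digits)) is the digit characters, for single-digit entries
lemma pvJoin_digits (l : List Int) (h : ∀ d ∈ l, 0 ≤ d ∧ d ≤ 9) :
    (PySem.Str.join "" (l.map PySem.Int.toStr)).toList = l.map pvDigitChar := by
  rw [PySem.Str.toList_join]
  have : List.map String.toList (l.map PySem.Int.toStr)
      = List.map (fun c => [c]) (l.map pvDigitChar) := by
    simp only [List.map_map]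
    apply List.map_congr_left
    intro d hd
    simp only [Function.comp_apply, PySem.Int.toList_toStr,
      pvToChars_digit d (h d hd).1 (h d hd).2]
  rw [this]
  simpa using PySem.Chars.join_nil_singletons (l.map pvDigitChar)

-- ===== VERDICT (by name: the statement is the Claim_ definition above) =====
theorem maxSumOfSquares_spec : Claim_equal_maxSumOfSquares := by
  intro num sum _
  unfold Spec_maxSumOfSquares maxSumOfSquares maxSumOfSquares_alt
  simp only [PySem.List.pyRepeat_singleton]
  set n : Nat := num.toNat with hn
  by_cases hneg : sum < 0
  · -- A: res stays all zeros, aa = 0 ≠ sum; B: guard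
    rw [pvFill_nonpos n sum (by omega)]
    rw [if_neg (by rw [pvFoldl_sum, pvSum_replicate]; omega), if_pos (Or.inl hneg)]
  · -- 0 ≤ sum; write sum = 9 * q + r
    set q : Nat := (PySem.Int.floordiv sum 9).toNat with hq
    set r : Int := PySem.Int.mod sum 9 with hr
    have hr0 : 0 ≤ r := PySem.Int.mod_nonneg sum (by norm_num)
    have hr9 : r < 9 := PySem.Int.mod_lt sum (by norm_num)
    have hfd : 0 ≤ PySem.Int.floordiv sum 9 := by
      rw [PySem.Int.floordiv_eq_ediv_of_pos (by norm_num : (0:Int) < 9)]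
      exact Int.ediv_nonneg (by omega) (by norm_num)
    have hsum : sum = 9 * (q : Int) + r := by
      have := PySem.Int.floordiv_mul_add_mod sum 9
      rw [hq]; push_cast [Int.toNat_of_nonneg hfd]; omega
    by_cases hbig : num * 9 < sum
    · -- overflow; the degenerate sub-case sum = 0 (so num < 0, res = []) still yields ""
      by_cases hz : sum = 0
      · rw [if_pos (Or.inr hbig), show n = 0 by omega, hz]
        decide
      · have hlt : n < q + (if r = 0 then 0 else 1) := by
          split <;> omega
        rw [hsum, pvFill_overflow n q r hr0 hr9 hlt]
        have hA : ¬ ((List.replicate n (9:Int)).foldl (fun a i => a + i) 0 = 9 * (q:Int) + r) := by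
          rw [pvFoldl_sum, pvSum_replicate]
          split at hlt <;> omega
        have hB : (9 * (q:Int) + r < 0 ∨ num * 9 < 9 * (q:Int) + r) := Or.inr (by omega)
        rw [if_neg hA, if_pos hB]
    · -- sum fits: A returns the join, B the closed form; the strings agree characterwise
      have hfit : q + (if r = 0 then 0 else 1) ≤ n := by
        split <;> omega
      rw [hsum, pvFill_ok q r hr0 hr9 n hfit]
      have hA : (List.replicate q (9:Int) ++ (if r = 0 then [] else [r])
          ++ List.replicate (n - q - (if r = 0 then 0 else 1)) 0).foldl (fun a i => a + i) 0
          = 9 * (q:Int) + r := by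
        rw [pvFoldl_sum]
        simp only [List.sum_append, pvSum_replicate]
        by_cases h : r = 0 <;> simp [h] <;> omega
      have hB : ¬ (9 * (q:Int) + r < 0 ∨ num * 9 < 9 * (q:Int) + r) := by omega
      rw [if_pos hA, if_neg hB]
      apply String.toList_inj.mp
      rw [pvJoin_digits _ (by
        intro d hd
        have : d = 9 ∨ d = r ∨ d = 0 := by
          rcases List.mem_append.mp hd with h | h
          · rcases List.mem_append.mp h with h | h
            · exact Or.inl (List.eq_of_mem_replicate h)
            · right; left
              split at h
              · simp at h
              · simpa using h
          · exact Or.inr (Or.inr (List.eq_of_mem_replicate h))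
        rcases this with rfl | rfl | rfl <;> omega)]
      rw [String.toList_ofList]
      simp only [List.map_append, List.map_replicate]
      have h9c : pvDigitChar 9 = '9' := by decide
      have h0c : pvDigitChar 0 = '0' := by decide
      have hlen : ((List.replicate q '9' ++
          if r ≠ 0 then PySem.Int.toChars r else []).length : Int)
          = (q : Int) + (if r = 0 then 0 else 1) := by
        simp only [List.length_append, List.length_replicate]
        rcases eq_or_ne r 0 with h | h
        · simp [h]
        · simp [h, pvToChars_digit r hr0 (by omega)]
      rw [hlen, h9c, h0c]
      have hpad : (num - ((q : Int) + (if r = 0 then 0 else 1))).toNat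
          = n - q - (if r = 0 then 0 else 1) := by split <;> omega
      rw [hpad]
      by_cases h : r = 0
      · simp [h]
      · rw [pvToChars_digit r hr0 (by omega)]
        simp [h, pvDigitChar]
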